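-- pv_equiv track=rewrite | github.com/babad00c/facematcher | facematcher.py | identify_common_clusters
-- ===== SOURCE A (Python) =====
-- def identify_common_clusters(clustered_faces, images_dict1, images_dict2):
--     common_clusters = {}
--
--     # Create sets of paths for efficient look-up
--     paths_set1 = set(images_dict1.keys())
--     paths_set2 = set(images_dict2.keys())
--
--     # Organize paths by cluster with their original image paths
--     clusters = {}
--     for labeled_path, cluster_label in clustered_faces.items():
--         if cluster_label not in clusters:
--             clusters[cluster_label] = []
--         clusters[cluster_label].append(labeled_path)  # Store the original path
--
--     # Determine common clusters by checking the origin of each path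
--     for cluster_label, paths in clusters.items():
--         if any(path in paths_set1 for path in paths) and any(path in paths_set2 for path in paths):
--             # For common clusters, use the labeled paths to represent individual faces
--             paths = [path for path, cluster in clustered_faces.items() if cluster == cluster_label]
--             common_clusters[cluster_label] = paths
--
--     return common_clusters
-- ===== SOURCE B (Python) =====
-- def identify_common_clusters(clustered_faces, images_dict1, images_dict2):
--     set1 = set(images_dict1)
--     set2 = set(images_dict2)
--     labels1 = {c for p, c in clustered_faces.items() if p in set1}
--     labels2 = {c for p, c in clustered_faces.items() if p in set2}
--     common = labels1 & labels2
--     result = {}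
--     for p, c in clustered_faces.items():
--         if c in common:
--             result.setdefault(c, []).append(p)
--     return result
-- ===== Notes on version B (the rewrite author's own statement) =====
-- stated objective: simpler
-- what changed: B replaces A's group-then-rescan design (build a clusters dict, test each group with any(), then re-filter all of clustered_faces per qualifying cluster) by computing the two label sets and their intersection up front and then shaping the output in one setdefault pass over clustered_faces.
import Mathlib
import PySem

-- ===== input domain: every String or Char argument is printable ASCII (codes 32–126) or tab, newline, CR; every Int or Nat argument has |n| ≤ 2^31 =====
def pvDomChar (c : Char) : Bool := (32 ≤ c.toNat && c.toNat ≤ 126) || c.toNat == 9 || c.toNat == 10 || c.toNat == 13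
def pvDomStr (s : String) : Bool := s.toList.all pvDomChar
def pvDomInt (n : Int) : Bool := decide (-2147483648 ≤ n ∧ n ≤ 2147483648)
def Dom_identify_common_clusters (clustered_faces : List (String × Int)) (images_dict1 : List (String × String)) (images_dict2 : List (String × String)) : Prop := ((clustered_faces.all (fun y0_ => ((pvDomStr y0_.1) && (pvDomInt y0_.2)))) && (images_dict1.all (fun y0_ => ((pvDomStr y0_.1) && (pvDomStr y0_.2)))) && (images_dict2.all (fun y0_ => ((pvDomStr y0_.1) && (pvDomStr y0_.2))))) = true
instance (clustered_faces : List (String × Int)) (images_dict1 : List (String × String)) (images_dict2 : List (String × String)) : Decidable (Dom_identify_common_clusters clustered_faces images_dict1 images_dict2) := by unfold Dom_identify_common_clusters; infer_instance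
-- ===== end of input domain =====

-- B computes the common-label set up front and shapes the output in one setdefault pass,
-- instead of A's grouping dict + any()-test + per-cluster re-scan of clustered_faces (objective: simpler).


-- ===== PORT A =====
def identify_common_clusters (clustered_faces : List (String × Int)) (images_dict1 : List (String × String)) (images_dict2 : List (String × String)) : List (Int × List String) :=
  -- paths_set1 = set(images_dict1.keys()); paths_set2 = set(images_dict2.keys())
  let paths_set1 : PySem.Set String := PySem.Set.ofList (images_dict1.map (·.1))
  let paths_set2 : PySem.Set String := PySem.Set.ofList (images_dict2.map (·.1))
  -- clusters = {}; for labeled_path, cluster_label in clustered_faces.items(): if not in: []; append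
  let clusters : PySem.Dict Int (List String) :=
    clustered_faces.foldl
      (fun d p =>
        let d := if d.contains p.2 then d else d.insert p.2 []
        d.modify p.2 [] (· ++ [p.1]))       -- clusters[cluster_label].append(labeled_path)
      PySem.Dict.empty
  -- for cluster_label, paths in clusters.items(): if any(...) and any(...): rebuild paths; insert
  let common_clusters : PySem.Dict Int (List String) :=
    clusters.items.foldl
      (fun acc cp =>
        if (cp.2.any (fun path => paths_set1.contains path)) &&
           (cp.2.any (fun path => paths_set2.contains path)) then
          acc.insert cp.1 ((clustered_faces.filter (fun q => q.2 == cp.1)).map (·.1))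
        else acc)
      PySem.Dict.empty
  common_clusters.items

-- ===== PORT B =====
def identify_common_clusters_alt (clustered_faces : List (String × Int)) (images_dict1 : List (String × String)) (images_dict2 : List (String × String)) : List (Int × List String) :=
  let set1 : PySem.Set String := PySem.Set.ofList (images_dict1.map (·.1))
  let set2 : PySem.Set String := PySem.Set.ofList (images_dict2.map (·.1))
  -- labels1/labels2: set comprehensions over clustered_faces.items()
  let labels1 : PySem.Set Int := PySem.Set.ofList ((clustered_faces.filter (fun p => set1.contains p.1)).map (·.2))
  let labels2 : PySem.Set Int := PySem.Set.ofList ((clustered_faces.filter (fun p => set2.contains p.1)).map (·.2))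
  let common : PySem.Set Int := PySem.Set.inter labels1 labels2
  -- result = {}; for p, c in items: if c in common: result.setdefault(c, []).append(p)
  -- (setdefault(c, []).append(p) = modify c [] (· ++ [p]))
  let result : PySem.Dict Int (List String) :=
    clustered_faces.foldl
      (fun d p => if common.contains p.2 then d.modify p.2 [] (· ++ [p.1]) else d)
      PySem.Dict.empty
  result.items

-- ===== PRECONDITION & SPEC =====
def Spec_identify_common_clusters (clustered_faces : List (String × Int)) (images_dict1 : List (String × String)) (images_dict2 : List (String × String)) (out : List (Int × List String)) : Prop := out = identify_common_clusters_alt clustered_faces images_dict1 images_dict2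
instance (clustered_faces : List (String × Int)) (images_dict1 : List (String × String)) (images_dict2 : List (String × String)) (out : List (Int × List String)) : Decidable (Spec_identify_common_clusters clustered_faces images_dict1 images_dict2 out) := by unfold Spec_identify_common_clusters; infer_instance

-- ===== CLAIM (what is proved, stated in full; the proofs are below) =====
def Claim_equal_identify_common_clusters : Prop := ∀ (clustered_faces : List (String × Int)) (images_dict1 : List (String × String)) (images_dict2 : List (String × String)), Dom_identify_common_clusters clustered_faces images_dict1 images_dict2 → Spec_identify_common_clusters clustered_faces images_dict1 images_dict2 (identify_common_clusters clustered_faces images_dict1 images_dict2)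

-- ===== LEMMAS AND PROOFS =====

-- the paths of cluster c, in clustered_faces order
def pvGroups (L : List (String × Int)) (c : Int) : List String :=
  (L.filter (fun q => q.2 == c)).map (·.1)

-- A's per-item 'insert [] if absent, then append' step is Dict.modify
theorem pv_step_eq_modify (d : PySem.Dict Int (List String)) (p : String × Int) :
    ((if d.contains p.2 then d else d.insert p.2 []).modify p.2 [] (· ++ [p.1]))
      = d.modify p.2 [] (· ++ [p.1]) := by
  by_cases h : d.contains p.2
  · simp [h]
  · simp only [Bool.not_eq_true] at h
    simp [h, PySem.Dict.modify, PySem.Dict.insert_insert_self,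
      PySem.Dict.getD_insert_self, PySem.Dict.getD_of_not_contains _ _ h]

-- grouping fold: values
theorem pv_groupFold_getD (L : List (String × Int)) (c : Int) :
    (L.foldl (fun d p => d.modify p.2 [] (· ++ [p.1])) PySem.Dict.empty).getD c []
      = pvGroups L c := by
  have h := PySem.Dict.getD_foldl_modify_append (L.map (fun p => (p.2, p.1)))
      (PySem.Dict.empty : PySem.Dict Int (List String)) c
  rw [List.foldl_map] at h
  simpa [pvGroups, List.filter_map, Function.comp_def, PySem.Dict.getD_empty] using h

-- grouping fold: keys
theorem pv_groupFold_keys (L : List (String × Int)) :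
    (L.foldl (fun d p => d.modify p.2 [] (· ++ [p.1])) PySem.Dict.empty).keys
      = PySem.Set.ofList (L.map (·.2)) := by
  have h := PySem.Dict.keys_foldl_modify_key L (fun p => p.2) ([] : List String)
      (fun _ p => (· ++ [p.1])) PySem.Dict.empty
  simpa [PySem.Set.ofList, PySem.Set.update, PySem.Dict.keys_empty] using h

theorem pv_groupFold_items (L : List (String × Int)) :
    (L.foldl (fun d p => d.modify p.2 [] (· ++ [p.1])) PySem.Dict.empty).items
      = (PySem.Set.ofList (L.map (·.2))).map (fun c => (c, pvGroups L c)) := by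
  rw [PySem.Dict.items_eq_map_keys _ (by
        rw [pv_groupFold_keys]; exact PySem.Set.nodup_ofList _) ([] : List String)]
  rw [pv_groupFold_keys]
  exact List.map_congr_left (fun c _ => by rw [pv_groupFold_getD])


-- first-occurrence set building (PySem.Set.ofList) commutes with filter
theorem pv_foldl_add_filter {α : Type} [BEq α] [LawfulBEq α] (q : α → Bool) :
    ∀ (xs : List α) (s : List α),
    (xs.filter q).foldl PySem.Set.add (s.filter q) = (xs.foldl PySem.Set.add s).filter q := by
  intro xs
  induction xs with
  | nil => intro s; simp
  | cons x xs ih =>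
    intro s
    have key : PySem.Set.add s x = if x ∈ s then s else s ++ [x] := by
      simp [PySem.Set.add]
    by_cases hq : q x = true
    · have hadd : PySem.Set.add (List.filter q s) x = List.filter q (PySem.Set.add s x) := by
        rw [key]
        by_cases hm : x ∈ s
        · simp [PySem.Set.add, hm, hq]
        · simp [PySem.Set.add, hm, hq, List.filter_append]
      simp only [List.filter_cons, hq, if_pos, List.foldl_cons]
      rw [hadd, ih]
    · simp only [Bool.not_eq_true] at hq
      have hadd : List.filter q (PySem.Set.add s x) = List.filter q s := by
        rw [key]
        by_cases hm : x ∈ s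
        · simp [hm]
        · simp [hm, List.filter_append, hq]
      simp only [List.filter_cons, hq, List.foldl_cons, Bool.false_eq_true, if_false]
      rw [← ih (PySem.Set.add s x), hadd, ih s]

theorem pv_ofList_filter {α : Type} [BEq α] [LawfulBEq α] (q : α → Bool) (xs : List α) :
    PySem.Set.ofList (xs.filter q) = (PySem.Set.ofList xs).filter q := by
  have := pv_foldl_add_filter q xs []
  simpa [PySem.Set.ofList_eq_foldl] using this

-- the two Boolean conditions agree: membership in B's intersection set = A's any()&&any() test
theorem pv_cond_eq (L : List (String × Int)) (S1 S2 : PySem.Set String) (c : Int) :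
    ((PySem.Set.inter
        (PySem.Set.ofList ((L.filter (fun p => S1.contains p.1)).map (·.2)))
        (PySem.Set.ofList ((L.filter (fun p => S2.contains p.1)).map (·.2)))).contains c)
      = (((pvGroups L c).any (fun path => S1.contains path)) &&
         ((pvGroups L c).any (fun path => S2.contains path))) := by
  rw [Bool.eq_iff_iff]
  simp only [PySem.Set.inter, PySem.Set.contains, List.contains_iff_mem, List.mem_filter,
    PySem.Set.mem_ofList, List.mem_map, List.any_eq_true, pvGroups, Bool.and_eq_true,
    beq_iff_eq]
  constructor
  · rintro ⟨⟨p, ⟨hp, hs1⟩, rfl⟩, p2, ⟨hp2, hs2⟩, heq⟩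
    exact ⟨⟨p.1, ⟨p, ⟨hp, rfl⟩, rfl⟩, hs1⟩, ⟨p2.1, ⟨p2, ⟨hp2, heq⟩, rfl⟩, hs2⟩⟩
  · rintro ⟨⟨x1, ⟨p1, ⟨hp1, hc1⟩, rfl⟩, hs1⟩, x2, ⟨p2, ⟨hp2, hc2⟩, rfl⟩, hs2⟩
    exact ⟨⟨p1, ⟨hp1, hs1⟩, hc1⟩, ⟨p2, ⟨hp2, hs2⟩, hc2⟩⟩

-- the main equality
theorem pv_main (L : List (String × Int)) (d1 d2 : List (String × String)) :
    identify_common_clusters L d1 d2 = identify_common_clusters_alt L d1 d2 := by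
  simp only [identify_common_clusters, identify_common_clusters_alt]
  set S1 : PySem.Set String := PySem.Set.ofList (d1.map (·.1)) with hS1
  set S2 : PySem.Set String := PySem.Set.ofList (d2.map (·.1)) with hS2
  set qB : Int → Bool := fun c =>
    (PySem.Set.inter
      (PySem.Set.ofList ((L.filter (fun p => S1.contains p.1)).map (·.2)))
      (PySem.Set.ofList ((L.filter (fun p => S2.contains p.1)).map (·.2)))).contains c with hqB
  -- A side: clusters fold step is a plain modify
  have hstep : (fun (d : PySem.Dict Int (List String)) (p : String × Int) =>
        (if d.contains p.2 then d else d.insert p.2 []).modify p.2 [] (· ++ [p.1]))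
      = (fun d p => d.modify p.2 [] (· ++ [p.1])) :=
    funext fun d => funext fun p => pv_step_eq_modify d p
  rw [hstep, pv_groupFold_items]
  -- B side: fold with guard = fold over the filtered list
  rw [show (fun (d : PySem.Dict Int (List String)) (p : String × Int) =>
        if qB p.2 then d.modify p.2 [] (· ++ [p.1]) else d)
      = (fun d p => if (fun (p : String × Int) => qB p.2) p then
          (fun (d : PySem.Dict Int (List String)) (p : String × Int) =>
            d.modify p.2 [] (· ++ [p.1])) d p else d) from rfl,
    ← List.foldl_filter]
  rw [← List.foldl_filter, pv_groupFold_items]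
  have hins := PySem.Dict.items_foldl_insert_fresh
      (List.filter (fun cp => (cp.2.any fun path => S1.contains path) && cp.2.any fun path => S2.contains path)
        (List.map (fun c => (c, pvGroups L c)) (PySem.Set.ofList (L.map (·.2)))))
      (fun cp => cp.1) (fun cp => (L.filter (fun q => q.2 == cp.1)).map (·.1)) PySem.Dict.empty
      (fun a _ => PySem.Dict.contains_empty _)
      (by
        have hnd : ((List.map (fun c => (c, pvGroups L c)) (PySem.Set.ofList (L.map (·.2)))).map
            (fun cp => cp.1)).Nodup := by
          simp only [List.map_map, Function.comp_def]
          rw [List.map_id']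
          exact PySem.Set.nodup_ofList (L.map (·.2))
        exact hnd.sublist (List.Sublist.map _ List.filter_sublist))
  beta_reduce at hins
  rw [hins]
  rw [List.filter_map, List.map_map]
  have hBlist : (L.filter (fun p => qB p.2)).map (fun x => x.2)
      = (L.map (fun x => x.2)).filter qB := by
    rw [List.filter_map]
    rfl
  rw [hBlist, pv_ofList_filter]
  have hcond : ((fun (cp : Int × List String) =>
        (cp.2.any fun path => S1.contains path) && cp.2.any fun path => S2.contains path)
        ∘ (fun c => (c, pvGroups L c))) = qB := by
    funext c
    exact (pv_cond_eq L S1 S2 c).symm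
  rw [hcond]
  simp only [Function.comp_def, List.nil_append, PySem.Dict.empty]
  apply List.map_congr_left
  intro c hc
  have hqc : qB c = true := (List.mem_filter.mp hc).2
  have : pvGroups (List.filter (fun p => qB p.2) L) c = pvGroups L c := by
    unfold pvGroups
    rw [List.filter_filter]
    congr 1
    apply List.filter_congr
    intro a _
    by_cases h : a.2 = c
    · simp [h, hqc]
    · simp [h]
  rw [this]
  rfl

-- ===== VERDICT (by name: the statement is the Claim_ definition above) =====
theorem identify_common_clusters_spec : Claim_equal_identify_common_clusters := by
  intro L d1 d2 _
  unfold Spec_identify_common_clusters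
  exact pv_main L d1 d2
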